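-- pv_equiv track=rewrite | github.com/globalbusinessadvisors/verdant | tools/generate-terrain.py | assign_zones
-- ===== SOURCE A (Python) =====
-- import math
--
-- def assign_zones(elevations, zone_count):
--     """Assign grid cells to zones using simple spatial partitioning."""
--     rows = len(elevations)
--     cols = len(elevations[0]) if rows > 0 else 0
--     zones = []
--
--     # Divide into roughly equal rectangular zones
--     side = max(1, int(math.sqrt(zone_count)))
--     zone_rows = max(1, rows // side)
--     zone_cols = max(1, cols // side)
--
--     for r in range(rows):
--         row_zones = []
--         for c in range(cols):
--             zr = min(r // zone_rows, side - 1)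
--             zc = min(c // zone_cols, side - 1)
--             zone_id = zr * side + zc
--             row_zones.append(min(zone_id, zone_count - 1))
--         zones.append(row_zones)
--
--     return zones
-- ===== SOURCE B (Python) =====
-- import math
--
-- def assign_zones(elevations, zone_count):
--     """Assign grid cells to zones by run-length block construction: build the
--     row/column band sequences by repeating each band id, compute one output row
--     per row band, and emit rows from that cache (no per-cell arithmetic)."""
--     rows = len(elevations)
--     cols = len(elevations[0]) if rows > 0 else 0
--     side = max(1, int(math.sqrt(zone_count)))
--     zone_rows = max(1, rows // side)
--     zone_cols = max(1, cols // side)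
--     cap = zone_count - 1
--
--     def band(n, width):
--         # band ids 0..side-2 each repeated `width` times, truncated to n,
--         # then padded with band id side-1 up to length n
--         b = []
--         for z in range(side - 1):
--             b += [z] * width
--         b = b[:n]
--         b += [side - 1] * (n - len(b))
--         return b
--
--     row_band = band(rows, zone_rows)
--     col_band = band(cols, zone_cols)
--     row_variants = [[min(rb * side + cb, cap) for cb in col_band]
--                     for rb in range(side)]
--     return [row_variants[rb] for rb in row_band]
-- ===== Notes on version B (the rewrite author's own statement) =====
-- stated objective: faster
-- what changed: Replaces per-cell band arithmetic over the whole grid with run-length construction: band sequences are built by repeating each band id, one output row is computed per row band (side distinct rows) and rows are emitted from that cache, so no division or min is done per cell.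
import Mathlib
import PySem

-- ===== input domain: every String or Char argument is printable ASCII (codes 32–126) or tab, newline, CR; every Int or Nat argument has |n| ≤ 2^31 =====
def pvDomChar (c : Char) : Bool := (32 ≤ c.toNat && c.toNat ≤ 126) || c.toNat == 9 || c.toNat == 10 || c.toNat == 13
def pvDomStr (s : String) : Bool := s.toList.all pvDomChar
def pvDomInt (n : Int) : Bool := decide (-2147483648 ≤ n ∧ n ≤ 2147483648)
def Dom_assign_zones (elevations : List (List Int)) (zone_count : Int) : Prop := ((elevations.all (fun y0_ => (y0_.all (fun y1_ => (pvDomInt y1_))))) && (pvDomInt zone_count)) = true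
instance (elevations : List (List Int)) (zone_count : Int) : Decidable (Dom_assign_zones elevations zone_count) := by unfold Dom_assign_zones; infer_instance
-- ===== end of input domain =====

-- B builds the band sequences by run-length repetition and emits one cached row per
-- row band instead of computing both zone indices per cell (faster). Return-value
-- equivalence only: B's Python output may share row list objects between equal rows.
-- int(math.sqrt n) = Nat.sqrt n for 0 ≤ n ≤ 2^31 (double sqrt is correctly rounded there).

-- ===== PORT A =====
def assign_zones (elevations : List (List Int)) (zone_count : Int) : List (List Int) :=
  let rows : Int := elevations.length
  let cols : Int := if rows > 0 then (elevations.headD []).length else 0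
  let side : Int := max 1 (Int.ofNat (Nat.sqrt zone_count.toNat))
  let zone_rows : Int := max 1 (PySem.Int.floordiv rows side)
  let zone_cols : Int := max 1 (PySem.Int.floordiv cols side)
  (PySem.List.pyRange 0 rows 1).map (fun r =>
    (PySem.List.pyRange 0 cols 1).map (fun c =>
      let zr := min (PySem.Int.floordiv r zone_rows) (side - 1)
      let zc := min (PySem.Int.floordiv c zone_cols) (side - 1)
      let zone_id := zr * side + zc
      min zone_id (zone_count - 1)))

-- ===== PORT B =====
-- helper `band` of Source B: band ids 0..side-2 each repeated `width` times ('b += [z]*width'),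
-- truncated to n ('b[:n]', exact as take since n = rows/cols ≥ 0), padded with side-1.
def pvBand (side width n : Int) : List Int :=
  let b := (PySem.List.pyRange 0 (side - 1) 1).foldl
      (fun acc z => acc ++ List.replicate width.toNat z) []
  let b := b.take n.toNat
  b ++ List.replicate (n - (b.length : Int)).toNat (side - 1)

def assign_zones_alt (elevations : List (List Int)) (zone_count : Int) : List (List Int) :=
  let rows : Int := elevations.length
  let cols : Int := if rows > 0 then (elevations.headD []).length else 0
  let side : Int := max 1 (Int.ofNat (Nat.sqrt zone_count.toNat))
  let zone_rows : Int := max 1 (PySem.Int.floordiv rows side)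
  let zone_cols : Int := max 1 (PySem.Int.floordiv cols side)
  let cap := zone_count - 1
  let row_band := pvBand side zone_rows rows
  let col_band := pvBand side zone_cols cols
  let row_variants := (PySem.List.pyRange 0 side 1).map
      (fun rb => col_band.map (fun cb => min (rb * side + cb) cap))
  -- row_variants[rb]: rb is a band id in [0, side), so the index is always in range
  row_band.map (fun rb => PySem.List.pyGetD row_variants rb [])

-- ===== PRECONDITION & SPEC =====
-- Pre_ excludes zone_count < 0: there math.sqrt raises ValueError in both A and B.
def Pre_assign_zones (elevations : List (List Int)) (zone_count : Int) : Prop := 0 ≤ zone_count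
instance (elevations : List (List Int)) (zone_count : Int) : Decidable (Pre_assign_zones elevations zone_count) := by unfold Pre_assign_zones; infer_instance
def pvWitness_assign_zones : List (List Int) × Int := ([[1, 2], [3, 4]], 4)
def Spec_assign_zones (elevations : List (List Int)) (zone_count : Int) (out : List (List Int)) : Prop := out = assign_zones_alt elevations zone_count
instance (elevations : List (List Int)) (zone_count : Int) (out : List (List Int)) : Decidable (Spec_assign_zones elevations zone_count out) := by unfold Spec_assign_zones; infer_instance

-- ===== CLAIM (what is proved, stated in full; the proofs are below) =====
def Claim_equal_assign_zones : Prop := ∀ (elevations : List (List Int)) (zone_count : Int), Dom_assign_zones elevations zone_count → Pre_assign_zones elevations zone_count → Spec_assign_zones elevations zone_count (assign_zones elevations zone_count)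

-- ===== LEMMAS AND PROOFS =====

lemma pv_band_flat (s w : Nat) (hw : 0 < w) :
    (List.range s).flatMap (fun k => List.replicate w ((k : Nat) : Int)) =
    (List.range (s * w)).map (fun i => ((i / w : Nat) : Int)) := by
  induction s with
  | zero => simp
  | succ s ih =>
    rw [List.range_succ, List.flatMap_append, ih, Nat.succ_mul, List.range_add,
        List.map_append]
    congr 1
    simp only [List.flatMap_cons, List.flatMap_nil, List.append_nil, List.map_map]
    symm
    rw [List.eq_replicate_iff]
    refine ⟨by simp, ?_⟩
    intro b hb
    simp only [List.mem_map, List.mem_range, Function.comp] at hb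
    obtain ⟨j, hj, rfl⟩ := hb
    congr 1
    rw [Nat.mul_comm, Nat.mul_add_div hw, Nat.div_eq_of_lt hj]; omega

lemma pvBand_eq (side width n : Int) (hs : 1 ≤ side) (hw : 1 ≤ width) (hn : 0 ≤ n) :
    pvBand side width n =
    (PySem.List.pyRange 0 n 1).map
      (fun i => min (PySem.Int.floordiv i width) (side - 1)) := by
  unfold pvBand
  obtain ⟨s1, hs1⟩ : ∃ s1 : Nat, side - 1 = (s1 : Int) := ⟨(side-1).toNat, by omega⟩
  obtain ⟨w', hw'⟩ : ∃ w' : Nat, width = (w' : Int) := ⟨width.toNat, by omega⟩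
  obtain ⟨n', hn'⟩ : ∃ n' : Nat, n = (n' : Int) := ⟨n.toNat, by omega⟩
  have hwpos : 0 < w' := by omega
  subst hw' hn'
  rw [hs1, PySem.List.pyRange_zero_nat, PySem.List.foldl_append_eq_flatMap, List.nil_append]
  simp only [Int.toNat_natCast, List.flatMap_map]
  rw [pv_band_flat s1 w' hwpos, PySem.List.pyRange_zero_nat, List.map_map, ← List.map_take,
      List.take_range]
  have hcast : ∀ i : Nat, min (PySem.Int.floordiv (i : Int) (w' : Int)) (s1 : Int)
      = ((min (i / w') s1 : Nat) : Int) := by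
    intro i
    rw [PySem.Int.floordiv_natCast, Nat.cast_min]
  by_cases hc : n' ≤ s1 * w'
  · rw [Nat.min_eq_left hc]
    have : ((n' : Int) - ((List.map (fun i => ((i / w' : Nat) : Int)) (List.range n')).length : Int)).toNat = 0 := by
      simp
    rw [this, List.replicate_zero, List.append_nil]
    apply List.map_congr_left
    intro i hi
    rw [List.mem_range] at hi
    rw [Function.comp, hcast]
    congr 1
    have : i / w' < s1 := (Nat.div_lt_iff_lt_mul hwpos).mpr (by omega)
    omega
  · rw [Nat.min_eq_right (by omega)]
    have hsplit : n' = s1 * w' + (n' - s1 * w') := by omega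
    rw [hsplit, List.range_add, List.map_append]
    congr 1
    · apply List.map_congr_left
      intro i hi
      rw [List.mem_range] at hi
      rw [Function.comp, hcast]
      congr 1
      have : i / w' < s1 := (Nat.div_lt_iff_lt_mul hwpos).mpr hi
      omega
    · have hlen : (((s1 * w' : Nat) : Int) - ((List.map (fun i => ((i / w' : Nat) : Int)) (List.range (s1 * w'))).length : Int)).toNat = 0 := by simp
      symm
      rw [List.map_map, List.eq_replicate_iff]
      constructor
      · simp
      · intro b hb
        simp only [List.mem_map, List.mem_range, Function.comp] at hb
        obtain ⟨j, hj, rfl⟩ := hb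
        have hdiv : (s1 * w' + j) / w' = s1 + j / w' := by
          rw [Nat.mul_comm, Nat.mul_add_div hwpos]
        rw [hcast (s1 * w' + j), hdiv, Nat.min_eq_right (Nat.le_add_right _ _)]

lemma pv_main (rows cols side zr zc cap : Int)
    (hs : 1 ≤ side) (hzr : 1 ≤ zr) (hzc : 1 ≤ zc) (hrows : 0 ≤ rows) (hcols : 0 ≤ cols) :
    (PySem.List.pyRange 0 rows 1).map (fun r =>
      (PySem.List.pyRange 0 cols 1).map (fun c =>
        min (min (PySem.Int.floordiv r zr) (side - 1) * side
             + min (PySem.Int.floordiv c zc) (side - 1)) cap)) =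
    (pvBand side zr rows).map (fun rb =>
      PySem.List.pyGetD ((PySem.List.pyRange 0 side 1).map
        (fun rb => (pvBand side zc cols).map (fun cb => min (rb * side + cb) cap))) rb []) := by
  rw [pvBand_eq side zr rows hs hzr hrows, pvBand_eq side zc cols hs hzc hcols, List.map_map]
  apply List.map_congr_left
  intro r hr
  rw [PySem.List.mem_pyRange_one] at hr
  have h0 : (0:Int) ≤ min (PySem.Int.floordiv r zr) (side - 1) := by
    have : 0 ≤ PySem.Int.floordiv r zr := by
      rw [PySem.Int.floordiv_eq_ediv_of_pos (by omega)]
      exact Int.ediv_nonneg hr.1 (by omega)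
    omega
  have h1 : min (PySem.Int.floordiv r zr) (side - 1) < side := by omega
  rw [Function.comp, PySem.List.pyGetD_map_pyRange_of_nonneg _ _ _ _ h0 h1, List.map_map]
  apply List.map_congr_left
  intro c hc
  rfl

-- ===== VERDICT (by name: the statement is the Claim_ definition above) =====
theorem assign_zones_spec : Claim_equal_assign_zones := by
  intro elevations zone_count _ hpre
  unfold Spec_assign_zones
  simp only [assign_zones, assign_zones_alt]
  exact pv_main (elevations.length : Int)
    (if (elevations.length : Int) > 0 then ((elevations.headD []).length : Int) else 0)
    (max 1 (Int.ofNat (Nat.sqrt zone_count.toNat)))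
    (max 1 (PySem.Int.floordiv (elevations.length : Int) (max 1 (Int.ofNat (Nat.sqrt zone_count.toNat)))))
    (max 1 (PySem.Int.floordiv (if (elevations.length : Int) > 0 then ((elevations.headD []).length : Int) else 0) (max 1 (Int.ofNat (Nat.sqrt zone_count.toNat)))))
    (zone_count - 1)
    (le_max_left 1 _) (le_max_left 1 _) (le_max_left 1 _)
    (Int.natCast_nonneg _) (by split <;> simp)
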